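-- pv_equiv track=rewrite | github.com/kennytm/mozart2-gtk3 | builders.py | _flag_sort_key
-- ===== SOURCE A (Python) =====
-- def _flag_sort_key(triple):
--     value = triple[1]
--     is_neg = value < 0
--     if is_neg:
--         value = ~value
--     bin_rep = bin(value)[2:]
--     pop_count = sum(1 for c in bin_rep if c == '1')
--     if is_neg:
--         return (0, pop_count, ~value)
--     else:
--         return (1, -pop_count, value)
-- ===== SOURCE B (Python) =====
-- def _popcount(n):
--     c = 0
--     while n:
--         n &= n - 1
--         c += 1
--     return c
--
--
-- def _flag_sort_key(triple):
--     value = triple[1]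
--     if value < 0:
--         value = ~value
--         return (0, _popcount(value), ~value)
--     return (1, -_popcount(value), value)
-- ===== Notes on version B (the rewrite author's own statement) =====
-- stated objective: alternative
-- what changed: Replaces the binary-string construction bin(value)[2:] plus a character scan with Kernighan's bit-clearing loop (n &= n-1), counting only the set bits arithmetically.
import Mathlib
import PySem

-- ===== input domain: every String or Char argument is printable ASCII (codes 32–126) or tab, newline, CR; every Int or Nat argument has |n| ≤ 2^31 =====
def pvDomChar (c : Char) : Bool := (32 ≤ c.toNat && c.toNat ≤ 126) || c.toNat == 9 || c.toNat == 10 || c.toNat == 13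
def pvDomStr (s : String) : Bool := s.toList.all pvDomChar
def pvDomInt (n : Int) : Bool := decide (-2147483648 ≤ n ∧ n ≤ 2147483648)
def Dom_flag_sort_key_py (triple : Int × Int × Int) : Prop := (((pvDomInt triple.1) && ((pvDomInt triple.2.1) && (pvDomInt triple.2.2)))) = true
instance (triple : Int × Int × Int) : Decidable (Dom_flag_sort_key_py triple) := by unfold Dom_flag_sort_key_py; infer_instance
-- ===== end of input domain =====

-- B replaces A's binary-string popcount (bin(value)[2:] scanned for '1' chars) with
-- Kernighan's bit-clearing loop (n &= n-1); an alternative of similar cost.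

-- ===== PORT A =====
-- bin(n) for n ≥ 0, without the '0b' prefix and without the leading '0' of bin(0):
-- the digit list Python's repr builds, most significant bit first.
def pvBinDigits (n : Nat) : List Char :=
  if n = 0 then [] else pvBinDigits (n / 2) ++ [if n % 2 = 1 then '1' else '0']
decreasing_by exact Nat.div_lt_self (by omega) (by omega)

def flag_sort_key_py (triple : Int × Int × Int) : Int × Int × Int :=
  let value := triple.2.1
  let is_neg : Bool := decide (value < 0)
  let value := if is_neg then ~~~value else value
  -- bin(value)[2:]  (value ≥ 0 here; bin(0)[2:] = "0")
  let bin_rep : List Char := if value.toNat = 0 then ['0'] else pvBinDigits value.toNat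
  -- sum(1 for c in bin_rep if c == '1')
  let pop_count : Int := ((bin_rep.count '1' : Nat) : Int)
  if is_neg then (0, pop_count, ~~~value) else (1, -pop_count, value)

-- ===== PORT B =====
-- Kernighan popcount: while n: n &= n - 1; c += 1
def pvKern (n : Nat) : Nat :=
  if n = 0 then 0 else pvKern (n &&& (n - 1)) + 1
decreasing_by exact lt_of_le_of_lt Nat.and_le_right (by omega)

def flag_sort_key_py_alt (triple : Int × Int × Int) : Int × Int × Int :=
  let value := triple.2.1
  if value < 0 then
    let value := ~~~value
    (0, ((pvKern value.toNat : Nat) : Int), ~~~value)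
  else
    (1, -((pvKern value.toNat : Nat) : Int), value)

-- ===== PRECONDITION & SPEC =====
def Spec_flag_sort_key_py (triple : Int × Int × Int) (out : Int × Int × Int) : Prop := out = flag_sort_key_py_alt triple
instance (triple : Int × Int × Int) (out : Int × Int × Int) : Decidable (Spec_flag_sort_key_py triple out) := by unfold Spec_flag_sort_key_py; infer_instance

-- ===== CLAIM (what is proved, stated in full; the proofs are below) =====
def Claim_equal_flag_sort_key_py : Prop := ∀ (triple : Int × Int × Int), Dom_flag_sort_key_py triple → Spec_flag_sort_key_py triple (flag_sort_key_py triple)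

-- ===== LEMMAS AND PROOFS =====

-- reference popcount by halving, the bridge between the two algorithms
def pvPc (n : Nat) : Nat :=
  if n = 0 then 0 else pvPc (n / 2) + n % 2
decreasing_by exact Nat.div_lt_self (by omega) (by omega)

theorem pvPc_two_mul (m : Nat) : pvPc (2 * m) = pvPc m := by
  rcases Nat.eq_zero_or_pos m with h | h
  · simp [h]
  · rw [pvPc]
    have : ¬ (2 * m = 0) := by omega
    simp only [this, if_false]
    have h1 : 2 * m / 2 = m := by omega
    have h2 : 2 * m % 2 = 0 := by omega
    rw [h1, h2]
    simp

theorem pvPc_two_mul_add_one (m : Nat) : pvPc (2 * m + 1) = pvPc m + 1 := by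
  rw [pvPc]
  have : ¬ (2 * m + 1 = 0) := by omega
  simp only [this, if_false]
  have h1 : (2 * m + 1) / 2 = m := by omega
  have h2 : (2 * m + 1) % 2 = 1 := by omega
  rw [h1, h2]

-- counting '1' digits of the binary string = the halving popcount
theorem binDigits_count (n : Nat) : (pvBinDigits n).count '1' = pvPc n := by
  induction n using Nat.strong_induction_on with
  | _ n ih =>
    rw [pvBinDigits, pvPc]
    by_cases h : n = 0
    · simp [h]
    · simp only [h, if_false]
      rw [List.count_append, ih (n / 2) (Nat.div_lt_self (by omega) (by omega))]
      rcases Nat.mod_two_eq_zero_or_one n with h2 | h2 <;> simp [h2]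

-- bit facts behind Kernighan's step
theorem and_pred_even (m : Nat) (hm : 0 < m) : (2*m) &&& (2*m - 1) = 2 * (m &&& (m-1)) := by
  apply Nat.eq_of_testBit_eq
  intro i
  cases i with
  | zero =>
    have e1 : 2*m % 2 = 0 := by omega
    have e2 : 2*(m &&& (m-1)) % 2 = 0 := by omega
    rw [Nat.testBit_and]
    simp only [Nat.testBit_zero]
    simp [e1, e2]
  | succ j =>
    have h1 : 2*m/2 = m := by omega
    have h2 : (2*m-1)/2 = m-1 := by omega
    have h3 : 2*(m &&& (m-1))/2 = m &&& (m-1) := by omega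
    rw [Nat.testBit_and]
    simp only [Nat.testBit_add_one]
    rw [h1, h2, h3, Nat.testBit_and]

theorem and_pred_odd (m : Nat) : (2*m+1) &&& (2*m) = 2*m := by
  apply Nat.eq_of_testBit_eq
  intro i
  cases i with
  | zero =>
    have e1 : 2*m % 2 = 0 := by omega
    rw [Nat.testBit_and]
    simp only [Nat.testBit_zero]
    simp [e1]
  | succ j =>
    have h1 : (2*m+1)/2 = m := by omega
    have h2 : 2*m/2 = m := by omega
    rw [Nat.testBit_and]
    simp only [Nat.testBit_add_one]
    rw [h1, h2]; simp

-- clearing the lowest set bit removes exactly one '1'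
theorem pvPc_clear_low (n : Nat) (hn : 0 < n) : pvPc (n &&& (n - 1)) + 1 = pvPc n := by
  induction n using Nat.strong_induction_on with
  | _ n ih =>
    rcases Nat.mod_two_eq_zero_or_one n with h2 | h2
    · -- n even, n = 2*m with m > 0
      obtain ⟨m, rfl⟩ : ∃ m, n = 2 * m := ⟨n / 2, by omega⟩
      have hm : 0 < m := by omega
      rw [and_pred_even m hm, pvPc_two_mul, pvPc_two_mul]
      exact ih m (by omega) hm
    · -- n odd, n = 2*m + 1
      obtain ⟨m, rfl⟩ : ∃ m, n = 2 * m + 1 := ⟨n / 2, by omega⟩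
      have he : 2 * m + 1 - 1 = 2 * m := by omega
      rw [he, and_pred_odd, pvPc_two_mul, pvPc_two_mul_add_one]

theorem pvKern_eq_pvPc (n : Nat) : pvKern n = pvPc n := by
  induction n using Nat.strong_induction_on with
  | _ n ih =>
    rw [pvKern]
    by_cases h : n = 0
    · simp [h, pvPc]
    · simp only [h, if_false]
      rw [ih (n &&& (n - 1)) (lt_of_le_of_lt Nat.and_le_right (by omega))]
      exact pvPc_clear_low n (by omega)

-- A's popcount of the binary string equals B's Kernighan count
theorem popcount_agree (x : Int) :
    List.count '1' (if x ≤ 0 then ['0'] else pvBinDigits x.toNat) = pvKern x.toNat := by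
  by_cases h : x ≤ 0
  · have h0 : x.toNat = 0 := by omega
    simp [h, h0, pvKern]
  · have h0 : ¬ (x.toNat = 0) := by omega
    simp only [h, if_false]
    rw [binDigits_count, pvKern_eq_pvPc]

-- ===== VERDICT (by name: the statement is the Claim_ definition above) =====
theorem flag_sort_key_py_spec : Claim_equal_flag_sort_key_py := by
  intro triple _
  unfold Spec_flag_sort_key_py
  show flag_sort_key_py triple = flag_sort_key_py_alt triple
  simp only [flag_sort_key_py, flag_sort_key_py_alt]
  by_cases h : triple.2.1 < 0 <;> simp [h, popcount_agree]
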